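-- pv_equiv track=rewrite | github.com/ValdezFOmar/advent-of-code-2023 | utils/core.py | adjacent_cells
-- ===== SOURCE A (Python) =====
-- from typing import (Generic, Iterable, Iterator, MutableSet, NamedTuple,
--                     Sequence, TypeVar)
--
-- T = TypeVar("T")
--
-- Matrix2D = Sequence[Sequence[T]]
--
-- class Cell(NamedTuple, Generic[T]):
--     """Simple container for cells in a 2d array."""
--
--     value: T
--     row: int
--     column: int
--
-- def calc_position_deviation(
--     pos_row: int,
--     max_row: int,
--     pos_column_start: int,
--     pos_column_end: int,
--     max_column: int,
-- ) -> tuple[int, int, int, int]: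
--     """Returns (start_row, end_row, start_column, end_column)"""
--     start_row = -1 if pos_row > 0 else 0
--     end_row = 2 if pos_row < max_row - 1 else 1
--     start_column = -1 if pos_column_start > 0 else 0
--     end_column = (
--         (pos_column_end - pos_column_start) + 1
--         if pos_column_end < max_column - 1
--         else max_column - pos_column_start
--     )
--     return start_row, end_row, start_column, end_column
--
-- def adjacent_cells(
--     matrix: Matrix2D[T],
--     pos_row: int,
--     pos_column_start: int,
--     pos_column_end: int,
-- ) -> Iterator[Cell[T]]:
--     """
--     Iterates over the cells around the area defined by the position parameters.
--     Parameter `pos_column_end` is exclusive.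
--     """
--     max_row, max_column = len(matrix), len(matrix[0])
--     start_row, end_row, start_column, end_column = calc_position_deviation(
--         pos_row, max_row, pos_column_start, pos_column_end, max_column
--     )
--
--     for row_deviation in range(start_row, end_row):
--         for column_deviation in range(start_column, end_column):
--             if (
--                 row_deviation == 0
--                 and pos_column_start <= column_deviation + pos_column_start <= pos_column_end - 1
--             ):
--                 continue
--
--             current_row = pos_row + row_deviation
--             current_column = pos_column_start + column_deviation
--             cell_value = matrix[current_row][current_column]
--
--             yield Cell(cell_value, current_row, current_column)
-- ===== SOURCE B (Python) =====
-- def adjacent_cells(matrix, pos_row, pos_column_start, pos_column_end):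
--     """Border of the region: top row, left/right neighbours, bottom row, emitted in
--     row-major order over a clamped column span [c_lo, c_hi) computed once."""
--     max_row, max_column = len(matrix), len(matrix[0])
--     c_lo = pos_column_start - 1 if pos_column_start > 0 else pos_column_start
--     c_hi = min(max_column, pos_column_end + 1)
--     if c_lo >= c_hi:
--         return  # empty column span: the region has no bordering cells
--     if pos_row > 0:
--         r = pos_row - 1
--         for c in range(c_lo, c_hi):
--             yield matrix[r][c], r, c
--     if pos_column_start > 0:
--         yield matrix[pos_row][pos_column_start - 1], pos_row, pos_column_start - 1
--     if pos_column_start <= pos_column_end < max_column: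
--         yield matrix[pos_row][pos_column_end], pos_row, pos_column_end
--     if pos_row < max_row - 1:
--         r = pos_row + 1
--         for c in range(c_lo, c_hi):
--             yield matrix[r][c], r, c
-- ===== Notes on version B (the rewrite author's own statement) =====
-- stated objective: simpler
-- what changed: Replaces A's deviation-tuple helper and the double loop with a continue-skip by an empty-span early return and three explicit passes (top border row, middle left/right neighbours, bottom border row) over a column span clamped once, preserving row-major output order.
import Mathlib
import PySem

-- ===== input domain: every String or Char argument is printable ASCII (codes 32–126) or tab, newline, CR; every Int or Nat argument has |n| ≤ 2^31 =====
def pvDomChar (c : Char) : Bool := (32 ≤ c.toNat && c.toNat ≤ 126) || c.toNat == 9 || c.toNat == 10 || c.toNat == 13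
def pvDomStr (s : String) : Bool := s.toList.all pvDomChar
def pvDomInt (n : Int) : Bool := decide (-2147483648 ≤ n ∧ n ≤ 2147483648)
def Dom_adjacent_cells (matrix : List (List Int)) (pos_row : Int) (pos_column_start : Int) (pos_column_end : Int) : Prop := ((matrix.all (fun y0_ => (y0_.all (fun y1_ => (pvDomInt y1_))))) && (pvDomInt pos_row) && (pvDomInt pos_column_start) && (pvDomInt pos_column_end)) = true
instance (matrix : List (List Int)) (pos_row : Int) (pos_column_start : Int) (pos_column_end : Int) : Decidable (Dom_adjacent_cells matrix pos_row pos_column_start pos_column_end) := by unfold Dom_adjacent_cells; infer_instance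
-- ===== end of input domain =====

-- B replaces A's deviation-tuple helper and the continue-skip double loop by three
-- explicit passes (top border row, middle left/right neighbours, bottom border row)
-- over a column span clamped once: a simpler decomposition, same cost, same order.

-- ===== PORT A =====
-- matrix[i][j] is ported with pyGetD (Python's negative-index rule included);
-- Pre_ guarantees every index Python touches is in range, so this is exact there.
def adjacent_cells (matrix : List (List Int)) (pos_row : Int) (pos_column_start : Int) (pos_column_end : Int) : List (Int × Int × Int) :=
  let max_row : Int := matrix.length
  let max_column : Int := (PySem.List.pyGetD matrix 0 []).length
  -- calc_position_deviation, inlined as its four lets (it is a pure tuple helper)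
  let start_row : Int := if pos_row > 0 then -1 else 0
  let end_row : Int := if pos_row < max_row - 1 then 2 else 1
  let start_column : Int := if pos_column_start > 0 then -1 else 0
  let end_column : Int :=
    if pos_column_end < max_column - 1 then (pos_column_end - pos_column_start) + 1
    else max_column - pos_column_start
  (PySem.List.pyRange start_row end_row 1).foldl (fun acc row_deviation =>
    (PySem.List.pyRange start_column end_column 1).foldl (fun acc column_deviation =>
      if row_deviation = 0 ∧ pos_column_start ≤ column_deviation + pos_column_start
           ∧ column_deviation + pos_column_start ≤ pos_column_end - 1 then acc
      else
        acc ++ [(PySem.List.pyGetD (PySem.List.pyGetD matrix (pos_row + row_deviation) []) (pos_column_start + column_deviation) 0,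
                 pos_row + row_deviation, pos_column_start + column_deviation)]) acc) []

-- ===== PORT B =====
def adjacent_cells_alt (matrix : List (List Int)) (pos_row : Int) (pos_column_start : Int) (pos_column_end : Int) : List (Int × Int × Int) :=
  let max_row : Int := matrix.length
  let max_column : Int := (PySem.List.pyGetD matrix 0 []).length
  let c_lo : Int := if pos_column_start > 0 then pos_column_start - 1 else pos_column_start
  let c_hi : Int := min max_column (pos_column_end + 1)
  if c_lo ≥ c_hi then []  -- empty column span: the region has no bordering cells
  else
    let border : Int → List (Int × Int × Int) := fun r =>
      (PySem.List.pyRange c_lo c_hi 1).map (fun c =>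
        (PySem.List.pyGetD (PySem.List.pyGetD matrix r []) c 0, r, c))
    (if pos_row > 0 then border (pos_row - 1) else []) ++
    (if pos_column_start > 0 then
        [(PySem.List.pyGetD (PySem.List.pyGetD matrix pos_row []) (pos_column_start - 1) 0,
          pos_row, pos_column_start - 1)] else []) ++
    (if pos_column_start ≤ pos_column_end ∧ pos_column_end < max_column then
        [(PySem.List.pyGetD (PySem.List.pyGetD matrix pos_row []) pos_column_end 0,
          pos_row, pos_column_end)] else []) ++
    (if pos_row < max_row - 1 then border (pos_row + 1) else [])

-- ===== PRECONDITION & SPEC =====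
-- Pre_ is exactly where the Python A returns (no IndexError): the matrix is nonempty
-- and, when the clamped column span [c_lo, c_hi) is nonempty, every border cell the
-- loops touch has its row and column inside Python's index range (negative indices
-- count from the end, hence the -len ≤ i < len bounds on wrapped row lengths).
-- The ports' list equality holds for all integer arguments (both ports read cells
-- through the same total pyGetD); Pre_ is what makes that pyGetD indexing exact
-- Python, so the equality claim is stated under it.
def Pre_adjacent_cells (matrix : List (List Int)) (pos_row : Int) (pos_column_start : Int) (pos_column_end : Int) : Prop :=
  matrix ≠ [] ∧
  ((if pos_column_start > 0 then pos_column_start - 1 else pos_column_start)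
      < min ((matrix.getD 0 []).length : Int) (pos_column_end + 1) →
    ((pos_row > 0 →
        -(matrix.length : Int) ≤ pos_row - 1 ∧ pos_row - 1 < (matrix.length : Int) ∧
        -((PySem.List.pyGetD matrix (pos_row - 1) []).length : Int)
            ≤ (if pos_column_start > 0 then pos_column_start - 1 else pos_column_start) ∧
        min ((matrix.getD 0 []).length : Int) (pos_column_end + 1)
            ≤ ((PySem.List.pyGetD matrix (pos_row - 1) []).length : Int)) ∧
     (pos_row < (matrix.length : Int) - 1 →
        -(matrix.length : Int) ≤ pos_row + 1 ∧ pos_row + 1 < (matrix.length : Int) ∧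
        -((PySem.List.pyGetD matrix (pos_row + 1) []).length : Int)
            ≤ (if pos_column_start > 0 then pos_column_start - 1 else pos_column_start) ∧
        min ((matrix.getD 0 []).length : Int) (pos_column_end + 1)
            ≤ ((PySem.List.pyGetD matrix (pos_row + 1) []).length : Int)) ∧
     (pos_column_start > 0 ∨
        ((if pos_column_start > 0 then pos_column_start - 1 else pos_column_start) ≤ pos_column_end ∧
         pos_column_end < ((matrix.getD 0 []).length : Int)) →
        -(matrix.length : Int) ≤ pos_row ∧ pos_row < (matrix.length : Int)) ∧
     (pos_column_start > 0 →
        -((PySem.List.pyGetD matrix pos_row []).length : Int) ≤ pos_column_start - 1 ∧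
        pos_column_start - 1 < ((PySem.List.pyGetD matrix pos_row []).length : Int)) ∧
     ((if pos_column_start > 0 then pos_column_start - 1 else pos_column_start) ≤ pos_column_end ∧
        pos_column_end < ((matrix.getD 0 []).length : Int) →
        -((PySem.List.pyGetD matrix pos_row []).length : Int) ≤ pos_column_end ∧
        pos_column_end < ((PySem.List.pyGetD matrix pos_row []).length : Int))))
instance (matrix : List (List Int)) (pos_row : Int) (pos_column_start : Int) (pos_column_end : Int) : Decidable (Pre_adjacent_cells matrix pos_row pos_column_start pos_column_end) := by unfold Pre_adjacent_cells; infer_instance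
def pvWitness_adjacent_cells : List (List Int) × Int × Int × Int := ([[1, 2], [3, 4]], 0, 0, 1)

def Spec_adjacent_cells (matrix : List (List Int)) (pos_row : Int) (pos_column_start : Int) (pos_column_end : Int) (out : List (Int × Int × Int)) : Prop := out = adjacent_cells_alt matrix pos_row pos_column_start pos_column_end
instance (matrix : List (List Int)) (pos_row : Int) (pos_column_start : Int) (pos_column_end : Int) (out : List (Int × Int × Int)) : Decidable (Spec_adjacent_cells matrix pos_row pos_column_start pos_column_end out) := by unfold Spec_adjacent_cells; infer_instance

-- ===== CLAIM (what is proved, stated in full; the proofs are below) =====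
def Claim_equal_adjacent_cells : Prop := ∀ (matrix : List (List Int)) (pos_row : Int) (pos_column_start : Int) (pos_column_end : Int), Dom_adjacent_cells matrix pos_row pos_column_start pos_column_end → Pre_adjacent_cells matrix pos_row pos_column_start pos_column_end → Spec_adjacent_cells matrix pos_row pos_column_start pos_column_end (adjacent_cells matrix pos_row pos_column_start pos_column_end)

-- ===== LEMMAS AND PROOFS =====

lemma pv_foldl_id (l : List Int) (acc : List (Int × Int × Int)) :
    l.foldl (fun a _ => a) acc = acc := by
  induction l generalizing acc with
  | nil => rfl
  | cons x xs ih => exact ih acc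

lemma pv_range_shift (ps lo hi : Int) :
    PySem.List.pyRange (ps + lo) (ps + hi) 1 = (PySem.List.pyRange lo hi 1).map (fun c => ps + c) := by
  rw [PySem.List.pyRange_one, PySem.List.pyRange_one, List.map_map]
  rw [show (ps + hi - (ps + lo)).toNat = (hi - lo).toNat by omega]
  congr 1
  funext k
  simp only [Function.comp_apply]
  omega

-- A's inner loop on a non-middle row r, with the column deviated by ps: the border map
lemma pv_row_foldl (matrix : List (List Int)) (r ps lo hi : Int) (acc : List (Int × Int × Int)) :
    (PySem.List.pyRange lo hi 1).foldl (fun acc c =>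
        acc ++ [(PySem.List.pyGetD (PySem.List.pyGetD matrix r []) (ps + c) 0, r, ps + c)]) acc
      = acc ++ (PySem.List.pyRange (ps + lo) (ps + hi) 1).map (fun c =>
          (PySem.List.pyGetD (PySem.List.pyGetD matrix r []) c 0, r, c)) := by
  rw [PySem.List.foldl_append_singleton_eq_map, pv_range_shift, List.map_map]
  rfl

-- the left-of-region segment of the middle scan: kept iff pos_column_start > 0
lemma pv_seg1 (ps pe : Int) :
    (PySem.List.pyRange (if ps > 0 then (-1 : Int) else 0) 0 1).filter
      (fun c => decide (¬ (ps ≤ c + ps ∧ c + ps ≤ pe - 1)))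
      = if ps > 0 then [(-1 : Int)] else [] := by
  split_ifs with h
  · rw [show (0 : Int) = -1 + 1 by omega, PySem.List.pyRange_one_singleton,
      List.filter_cons_of_pos (by simp only [decide_eq_true_eq]; omega), List.filter_nil]
  · rw [PySem.List.pyRange_one_eq_nil (by omega)]
    rfl

-- a column segment lying wholly inside the region: the continue-skip drops all of it
lemma pv_seg_skip (ps pe lo hi : Int) (h0 : 0 ≤ lo) (h1 : hi ≤ pe - ps) :
    (PySem.List.pyRange lo hi 1).filter
      (fun c => decide (¬ (ps ≤ c + ps ∧ c + ps ≤ pe - 1))) = [] := by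
  rw [List.filter_eq_nil_iff]
  intro c hc
  rw [PySem.List.mem_pyRange_one] at hc
  simp only [decide_eq_true_eq]
  omega

-- A's middle-row loop with the continue-skip yields exactly the left then right neighbour
lemma pv_mid_foldl (matrix : List (List Int)) (pr ps pe w : Int)
    (hne : (if ps > 0 then (-1 : Int) else 0) < (if pe < w - 1 then (pe - ps) + 1 else w - ps))
    (acc : List (Int × Int × Int)) :
    (PySem.List.pyRange (if ps > 0 then (-1 : Int) else 0)
        (if pe < w - 1 then (pe - ps) + 1 else w - ps) 1).foldl
      (fun acc c => if ps ≤ c + ps ∧ c + ps ≤ pe - 1 then acc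
        else acc ++ [(PySem.List.pyGetD (PySem.List.pyGetD matrix pr []) (ps + c) 0, pr, ps + c)]) acc
      = acc ++ ((if ps > 0 then
                  [(PySem.List.pyGetD (PySem.List.pyGetD matrix pr []) (ps - 1) 0, pr, ps - 1)] else []) ++
                (if ps ≤ pe ∧ pe < w then
                  [(PySem.List.pyGetD (PySem.List.pyGetD matrix pr []) pe 0, pr, pe)] else [])) := by
  have hbody : (fun (acc : List (Int × Int × Int)) (c : Int) =>
      if ps ≤ c + ps ∧ c + ps ≤ pe - 1 then acc
      else acc ++ [(PySem.List.pyGetD (PySem.List.pyGetD matrix pr []) (ps + c) 0, pr, ps + c)])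
      = (fun acc c => if ¬ (ps ≤ c + ps ∧ c + ps ≤ pe - 1)
          then acc ++ [(PySem.List.pyGetD (PySem.List.pyGetD matrix pr []) (ps + c) 0, pr, ps + c)]
          else acc) := by
    funext acc c
    by_cases h : ps ≤ c + ps ∧ c + ps ≤ pe - 1
    · rw [if_pos h, if_neg (not_not_intro h)]
    · rw [if_neg h, if_pos h]
  rw [hbody, PySem.List.foldl_append_ite]
  have hfil : (PySem.List.pyRange (if ps > 0 then (-1 : Int) else 0)
        (if pe < w - 1 then (pe - ps) + 1 else w - ps) 1).filter
      (fun c => decide (¬ (ps ≤ c + ps ∧ c + ps ≤ pe - 1)))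
      = (if ps > 0 then [(-1 : Int)] else []) ++ (if ps ≤ pe ∧ pe < w then [pe - ps] else []) := by
    by_cases hr : ps ≤ pe ∧ pe < w
    · have hec : (if pe < w - 1 then (pe - ps) + 1 else w - ps) = (pe - ps) + 1 := by
        split_ifs <;> omega
      rw [hec, PySem.List.pyRange_one_append _ (pe - ps) _ (by split_ifs <;> omega) (by omega),
        PySem.List.pyRange_one_append _ 0 (pe - ps) (by split_ifs <;> omega) (by omega),
        List.filter_append, List.filter_append, pv_seg1,
        pv_seg_skip ps pe 0 (pe - ps) (by omega) (by omega),
        PySem.List.pyRange_one_singleton,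
        List.filter_cons_of_pos (by simp only [decide_eq_true_eq]; omega), List.filter_nil,
        if_pos hr, List.append_nil]
    · rw [if_neg hr, List.append_nil]
      by_cases hw2 : pe < w
      · -- then pe < ps and (by hne) ps > 0 with an upper bound of exactly 0
        have hps : 0 < ps := by by_contra hc; split_ifs at hne <;> omega
        have hec : (if pe < w - 1 then (pe - ps) + 1 else w - ps) = 0 := by
          split_ifs at hne ⊢ <;> omega
        rw [hec, pv_seg1, if_pos hps]
      · have hec : (if pe < w - 1 then (pe - ps) + 1 else w - ps) = w - ps := by
          split_ifs <;> omega
        rw [hec] at hne ⊢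
        rw [PySem.List.pyRange_one_append _ 0 (w - ps) (by split_ifs <;> omega)
            (by split_ifs at hne <;> omega),
          List.filter_append, pv_seg1, pv_seg_skip ps pe 0 (w - ps) (by omega) (by omega),
          List.append_nil]
  rw [hfil, List.map_append]
  congr 1
  congr 1
  · split_ifs with h
    · rw [List.map_cons, List.map_nil, show ps + (-1 : Int) = ps - 1 by ring]
    · rfl
  · split_ifs with h
    · rw [List.map_cons, List.map_nil, show ps + (pe - ps) = pe by ring]
    · rfl

-- ===== VERDICT (by name: the statement is the Claim_ definition above) =====
theorem adjacent_cells_spec : Claim_equal_adjacent_cells := by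
  intro matrix pr ps pe _ _
  unfold Spec_adjacent_cells adjacent_cells adjacent_cells_alt
  simp only []
  by_cases hspan : (if ps > 0 then ps - 1 else ps)
      ≥ min ((PySem.List.pyGetD matrix 0 []).length : Int) (pe + 1)
  · rw [if_pos hspan]
    rw [show PySem.List.pyRange (if ps > 0 then (-1 : Int) else 0)
        (if pe < ((PySem.List.pyGetD matrix 0 []).length : Int) - 1 then (pe - ps) + 1
         else ((PySem.List.pyGetD matrix 0 []).length : Int) - ps) 1 = [] from
      PySem.List.pyRange_one_eq_nil (by split_ifs at hspan ⊢ <;> omega)]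
    simp only [List.foldl_nil]
    rw [pv_foldl_id]
  · rw [if_neg hspan]
    rw [not_le] at hspan
    have hne : (if ps > 0 then (-1 : Int) else 0)
        < (if pe < ((PySem.List.pyGetD matrix 0 []).length : Int) - 1 then (pe - ps) + 1
           else ((PySem.List.pyGetD matrix 0 []).length : Int) - ps) := by
      split_ifs at hspan ⊢ <;> omega
    by_cases hp1 : pr > 0 <;> by_cases hp2 : pr < (matrix.length : Int) - 1 <;>
      [ (rw [if_pos hp1, if_pos hp2, if_pos hp1, if_pos hp2,
          show PySem.List.pyRange (-1) 2 1 = [(-1 : Int), 0, 1] from by decide]);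
        (rw [if_pos hp1, if_neg hp2, if_pos hp1, if_neg hp2,
          show PySem.List.pyRange (-1) 1 1 = [(-1 : Int), 0] from by decide]);
        (rw [if_neg hp1, if_pos hp2, if_neg hp1, if_pos hp2,
          show PySem.List.pyRange 0 2 1 = [(0 : Int), 1] from by decide]);
        (rw [if_neg hp1, if_neg hp2, if_neg hp1, if_neg hp2,
          show PySem.List.pyRange 0 1 1 = [(0 : Int)] from by decide]) ] <;>
    simp only [List.foldl_cons, List.foldl_nil] <;>
    simp only [show ∀ P : Prop, ((-1 : Int) = 0 ∧ P) = False from fun P => by simp,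
      show ∀ P : Prop, ((1 : Int) = 0 ∧ P) = False from fun P => by simp,
      true_and, if_false, add_zero, show pr + (-1 : Int) = pr - 1 from by ring] <;>
    rw [pv_mid_foldl matrix pr ps pe ((PySem.List.pyGetD matrix 0 []).length : Int) hne] <;>
    try rw [pv_row_foldl] <;> try rw [pv_row_foldl]
    all_goals
      try rw [show ps + (if ps > 0 then (-1 : Int) else 0) = (if ps > 0 then ps - 1 else ps) from by
          split_ifs <;> omega,
        show ps + (if pe < ((PySem.List.pyGetD matrix 0 []).length : Int) - 1 then (pe - ps) + 1
            else ((PySem.List.pyGetD matrix 0 []).length : Int) - ps)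
          = min ((PySem.List.pyGetD matrix 0 []).length : Int) (pe + 1) from by
          split_ifs <;> omega]
    all_goals simp [List.append_assoc]
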